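-- pv_equiv track=rewrite | github.com/nitinrao2025/cryptography | bijective_mod101.py | check_if_bijective
-- ===== SOURCE A (Python) =====
-- def check_if_bijective(a):
--     set_of_vals = set()
--     for x in range(1, 101):
--         fx = (a * x) % 101
--         if fx in set_of_vals:
--             return False
--         set_of_vals.add(fx)
--     return True
-- ===== SOURCE B (Python) =====
-- def check_if_bijective(a):
--     # 101 is prime, so x -> a*x mod 101 is a bijection on the residues iff 101 does not divide a
--     return a % 101 != 0
-- ===== Notes on version B (the rewrite author's own statement) =====
-- stated objective: simpler
-- what changed: Replaced the collision-scan over x=1..100 with a set by the closed-form number-theoretic test a % 101 != 0 (valid since 101 is prime).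
import Mathlib
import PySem

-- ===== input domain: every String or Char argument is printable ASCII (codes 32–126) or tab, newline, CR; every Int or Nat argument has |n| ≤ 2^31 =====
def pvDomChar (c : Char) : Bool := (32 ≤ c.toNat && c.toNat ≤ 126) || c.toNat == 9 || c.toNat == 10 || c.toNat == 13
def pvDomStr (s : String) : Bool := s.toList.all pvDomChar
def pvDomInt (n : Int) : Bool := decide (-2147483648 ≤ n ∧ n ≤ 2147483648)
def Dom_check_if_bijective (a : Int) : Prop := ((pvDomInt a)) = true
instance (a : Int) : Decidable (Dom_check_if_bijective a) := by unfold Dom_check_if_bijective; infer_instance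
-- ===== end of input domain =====

-- B replaces A's collision scan over x=1..100 with the closed-form test a % 101 != 0, valid because 101 is prime (objective: simpler).


-- ===== PORT A =====
-- loop over range(1, 101) with an early return on collision; the set is PySem.Set
def checkLoopA (a : Int) : List Int → PySem.Set Int → Bool
  | [], _ => true
  | x :: xs, s =>
    let fx := PySem.Int.mod (a * x) 101
    if PySem.Set.contains s fx then false
    else checkLoopA a xs (PySem.Set.add s fx)

def check_if_bijective (a : Int) : Bool :=
  checkLoopA a (PySem.List.pyRange 1 101 1) PySem.Set.empty

-- ===== PORT B =====
-- B: closed form, `a % 101 != 0`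
def check_if_bijective_alt (a : Int) : Bool :=
  decide (PySem.Int.mod a 101 ≠ 0)
-- ===== PRECONDITION & SPEC =====
def Spec_check_if_bijective (a : Int) (out : Bool) : Prop := out = check_if_bijective_alt a
instance (a : Int) (out : Bool) : Decidable (Spec_check_if_bijective a out) := by unfold Spec_check_if_bijective; infer_instance

-- ===== CLAIM (what is proved, stated in full; the proofs are below) =====
def Claim_equal_check_if_bijective : Prop := ∀ (a : Int), Dom_check_if_bijective a → Spec_check_if_bijective a (check_if_bijective a)

-- ===== LEMMAS AND PROOFS =====
-- the loop's verdict depends only on a mod 101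
theorem checkLoopA_mod (a : Int) (xs : List Int) (s : PySem.Set Int) :
    checkLoopA a xs s = checkLoopA (a % 101) xs s := by
  induction xs generalizing s with
  | nil => rfl
  | cons x xs ih =>
      have hfx : PySem.Int.mod (a * x) 101 = PySem.Int.mod (a % 101 * x) 101 := by
        simp [Int.mul_emod]
      simp only [checkLoopA, hfx]
      split <;> simp [ih]

theorem check_mod (a : Int) :
    check_if_bijective a = check_if_bijective (a % 101) := by
  unfold check_if_bijective
  rw [checkLoopA_mod a, checkLoopA_mod (a % 101), Int.emod_emod_of_dvd _ (dvd_refl 101)]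

theorem alt_mod (a : Int) :
    check_if_bijective_alt a = check_if_bijective_alt (a % 101) := by
  simp [check_if_bijective_alt, Int.emod_emod_of_dvd _ (dvd_refl 101)]

-- the loop returns true when the remaining images are pairwise distinct and avoid the set
theorem checkLoopA_true (a : Int) (xs : List Int) (s : PySem.Set Int)
    (hnd : (xs.map (fun x => PySem.Int.mod (a * x) 101)).Nodup)
    (havoid : ∀ x ∈ xs, PySem.Int.mod (a * x) 101 ∉ s) :
    checkLoopA a xs s = true := by
  induction xs generalizing s with
  | nil => rfl
  | cons x xs ih =>
      simp only [List.map_cons, List.nodup_cons, List.mem_map] at hnd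
      have hx : PySem.Int.mod (a * x) 101 ∉ s := havoid x (by simp)
      simp only [checkLoopA]
      rw [if_neg (by simpa [PySem.Set.contains] using hx)]
      refine ih _ hnd.2 ?_
      intro y hy
      rw [PySem.Set.mem_add]
      push Not
      exact ⟨havoid y (by simp [hy]), fun h => hnd.1 ⟨y, hy, h⟩⟩

-- injectivity of x ↦ a·x mod 101 on 1..100 when 101 ∤ a (101 is prime)
theorem nodup_images (r : Int) (h0 : 0 < r) (h1 : r < 101) :
    ((PySem.List.pyRange 1 101 1).map (fun x => PySem.Int.mod (r * x) 101)).Nodup := by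
  have hp : Prime (101 : Int) := by
    rw [Int.prime_iff_natAbs_prime]; norm_num
  apply (PySem.List.nodup_pyRange_one 1 101).map_on
  intro x hx y hy hxy
  rw [PySem.List.mem_pyRange_one] at hx hy
  simp only [PySem.Int.mod_eq_emod_of_pos (by norm_num : (0:Int) < 101)] at hxy
  have hdvd : (101 : Int) ∣ r * y - r * x := (Int.ModEq.dvd hxy)
  have : r * y - r * x = r * (y - x) := by ring
  rw [this] at hdvd
  rcases hp.dvd_mul.mp hdvd with hr | hxy'
  · have := Int.le_of_dvd h0 hr; omega
  · rcases hxy' with ⟨k, hk⟩; omega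

theorem check_zero : check_if_bijective 0 = check_if_bijective_alt 0 := by decide

-- ===== VERDICT (by name: the statement is the Claim_ definition above) =====
theorem check_if_bijective_spec : Claim_equal_check_if_bijective := by
  intro a _
  unfold Spec_check_if_bijective
  rw [check_mod, alt_mod]
  have h0 : 0 ≤ a % 101 := Int.emod_nonneg a (by norm_num)
  have h1 : a % 101 < 101 := Int.emod_lt_of_pos a (by norm_num)
  rcases eq_or_lt_of_le h0 with hz | hpos
  · rw [← hz]; exact check_zero
  · have htrue : check_if_bijective (a % 101) = true := by
      apply checkLoopA_true
      · exact nodup_images _ hpos h1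
      · intro x _ h; exact absurd h (by simp [PySem.Set.empty])
    rw [htrue, check_if_bijective_alt]
    have : PySem.Int.mod (a % 101) 101 = a % 101 := by
      rw [PySem.Int.mod_eq_emod_of_pos (by norm_num : (0:Int) < 101),
        Int.emod_emod_of_dvd _ (dvd_refl 101)]
    rw [this]
    simp
    omega
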